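-- pv_equiv track=rewrite | github.com/ohad1s/Intro_to_Python | tirgul_9/second.py | value_of_digit
-- ===== SOURCE A (Python) =====
-- def value_of_digit(number,digit): #solution with string
--     number_str = str(number)
--     if number_str=="":
--         return 0
--     last_char = number_str[-1]
--     if last_char == str(digit):
--         return 1
--     return 10 * value_of_digit(number_str[:-1], digit)
-- ===== SOURCE B (Python) =====
-- def value_of_digit(number, digit):
--     s = str(number)
--     d = str(digit)
--     if len(d) != 1:
--         return 0
--     idx = s.rfind(d)
--     if idx == -1:
--         return 0
--     return 10 ** (len(s) - 1 - idx)
-- ===== Notes on version B (the rewrite author's own statement) =====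
-- stated objective: idiomatic
-- what changed: Replaces the digit-by-digit string-peeling recursion with a single rfind on str(number) plus a closed-form power of ten (returning 0 up front when str(digit) is not one character).
import Mathlib
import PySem

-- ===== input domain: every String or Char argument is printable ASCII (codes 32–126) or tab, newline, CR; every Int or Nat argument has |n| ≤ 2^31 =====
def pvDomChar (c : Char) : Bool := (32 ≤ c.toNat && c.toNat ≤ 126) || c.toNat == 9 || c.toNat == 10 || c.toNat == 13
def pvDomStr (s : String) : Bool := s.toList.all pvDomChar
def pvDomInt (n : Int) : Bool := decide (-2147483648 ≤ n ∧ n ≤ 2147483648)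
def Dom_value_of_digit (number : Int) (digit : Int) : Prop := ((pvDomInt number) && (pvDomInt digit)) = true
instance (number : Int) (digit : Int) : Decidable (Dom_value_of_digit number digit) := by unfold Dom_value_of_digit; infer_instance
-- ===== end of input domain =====

-- B replaces A's digit-by-digit string-peeling recursion with one rfind plus a closed-form power of ten (idiomatic).

-- ===== PORT A =====
-- A recurses on number_str[:-1]; after the first call 'number' is already a string,
-- so the recursion is carried by this helper on the character list of str(number).
def valGoA (s : List Char) (digit : Int) : Int :=
  if h : s = [] then 0
  else
    let last := s.getLast h          -- number_str[-1]
    if [last] = (PySem.Int.toStr digit).toList then 1   -- last_char == str(digit)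
    else 10 * valGoA s.dropLast digit                    -- 10 * value_of_digit(number_str[:-1], digit)
termination_by s.length
decreasing_by
  have : s.length ≠ 0 := fun h0 => h (List.eq_nil_of_length_eq_zero h0)
  simp [List.length_dropLast]; omega

def value_of_digit (number : Int) (digit : Int) : Int :=
  valGoA (PySem.Int.toStr number).toList digit

-- ===== PORT B =====
-- hand port of s.rfind(c) for a single character c (PySem has no rfind): the
-- rightmost index of c in s, or -1; exact because c is one character.
def valRfind (s : List Char) (c : Char) : Int :=
  match s.reverse.findIdx? (· = c) with
  | none => -1
  | some j => (s.length : Int) - 1 - (j : Int)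

def value_of_digit_alt (number : Int) (digit : Int) : Int :=
  let s := (PySem.Int.toStr number).toList
  let d := (PySem.Int.toStr digit).toList
  if d.length ≠ 1 then 0
  else
    let idx := valRfind s d.head!
    if idx = -1 then 0
    else 10 ^ ((s.length : Int) - 1 - idx).toNat   -- exponent is ≥ 0, as in Python

-- ===== PRECONDITION & SPEC =====
def Spec_value_of_digit (number : Int) (digit : Int) (out : Int) : Prop := out = value_of_digit_alt number digit
instance (number : Int) (digit : Int) (out : Int) : Decidable (Spec_value_of_digit number digit out) := by unfold Spec_value_of_digit; infer_instance

-- ===== CLAIM (what is proved, stated in full; the proofs are below) =====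
def Claim_equal_value_of_digit : Prop := ∀ (number : Int) (digit : Int), Dom_value_of_digit number digit → Spec_value_of_digit number digit (value_of_digit number digit)

-- ===== LEMMAS AND PROOFS =====

-- If str(digit) is not a single character, A's comparison never fires and the result is 0.
theorem valGoA_ne_one (s : List Char) (digit : Int)
    (hd : ((PySem.Int.toStr digit).toList).length ≠ 1) : valGoA s digit = 0 := by
  induction s using List.reverseRecOn with
  | nil => simp [valGoA]
  | append_singleton t a ih =>
      rw [valGoA]
      have hne : t ++ [a] ≠ [] := by simp
      simp only [hne, dite_false]
      have hlast : (t ++ [a]).getLast hne = a := List.getLast_concat (l := t) (a := a)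
      rw [hlast]
      have hcond : ¬ ([a] = (PySem.Int.toStr digit).toList) := fun h => hd (by rw [← h]; rfl)
      rw [if_neg hcond, List.dropLast_concat, ih, mul_zero]

-- If str(digit) = [c], A computes 10^j where j is the index of c in the reversed string.
theorem valGoA_single (s : List Char) (digit : Int) (c : Char)
    (hd : (PySem.Int.toStr digit).toList = [c]) :
    valGoA s digit = (match s.reverse.findIdx? (· = c) with
                      | none => 0
                      | some j => (10 : Int) ^ j) := by
  induction s using List.reverseRecOn with
  | nil => simp [valGoA]
  | append_singleton t a ih =>
      rw [valGoA]
      have hne : t ++ [a] ≠ [] := by simp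
      simp only [hne, dite_false]
      have hlast : (t ++ [a]).getLast hne = a := List.getLast_concat (l := t) (a := a)
      rw [hlast, hd]
      by_cases hac : a = c
      · subst hac
        simp [List.findIdx?_cons]
      · have hne2 : ¬ ([a] = [c]) := by simp [hac]
        simp only [hne2, if_false, List.dropLast_concat, ih]
        rw [List.reverse_append]
        simp only [List.reverse_singleton, List.singleton_append, List.findIdx?_cons]
        have : (a = c) = False := by simp [hac]
        simp only [hac, decide_false]
        cases hfi : List.findIdx? (· = c) t.reverse with
        | none => simp
        | some j => simp [pow_succ, mul_comm]

theorem valFind_lt (c : Char) (l : List Char) : ∀ (j : Nat), l.findIdx? (· = c) = some j → j < l.length := by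
  induction l with
  | nil => intro j h; simp at h
  | cons a t ih =>
      intro j h
      rw [List.findIdx?_cons] at h
      by_cases hp : a = c
      · simp [hp] at h
        simp only [List.length_cons]
        omega
      · simp [hp] at h
        obtain ⟨k, hk, rfl⟩ := h
        have := ih k hk
        simp only [List.length_cons]
        omega

theorem value_of_digit_eq_alt (number digit : Int) :
    value_of_digit number digit = value_of_digit_alt number digit := by
  rcases hE : (PySem.Int.toStr digit).toList with _ | ⟨x, _ | ⟨y, ys⟩⟩
  · simp only [value_of_digit, value_of_digit_alt, hE]
    rw [valGoA_ne_one _ digit (by rw [hE]; simp)]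
    simp
  · -- str(digit) is the single character x
    simp only [value_of_digit, value_of_digit_alt, hE]
    rw [valGoA_single _ digit x hE]
    simp only [List.length_singleton, ne_eq, not_true_eq_false, if_false, List.head!]
    unfold valRfind
    cases hfi : (PySem.Int.toStr number).toList.reverse.findIdx? (· = x) with
    | none => simp
    | some j =>
        have hj : j < (PySem.Int.toStr number).toList.length := by
          have := valFind_lt x _ j hfi
          simpa using this
        simp only
        have hne : (((PySem.Int.toStr number).toList.length : Int) - 1 - (j : Int)) ≠ -1 := by omega
        rw [if_neg hne]
        congr 1
        omega
  · simp only [value_of_digit, value_of_digit_alt, hE]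
    rw [valGoA_ne_one _ digit (by rw [hE]; simp)]
    simp

-- ===== VERDICT (by name: the statement is the Claim_ definition above) =====
theorem value_of_digit_spec : Claim_equal_value_of_digit := by
  intro number digit _
  unfold Spec_value_of_digit
  exact value_of_digit_eq_alt number digit
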